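-- pv_equiv track=rewrite | github.com/Billybar/py-exam | 24b_d-26-8/q4.py | magic_list
-- ===== SOURCE A (Python) =====
-- def magic_list(mat: list[list[int]]) -> bool:
--     if not mat:
--         # An empty matrix, by definition, has no frame or inner elements.
--         # So, the sum of both is 0, making them equal.
--         return True
--
--     rows = len(mat)
--     cols = len(mat[0])
--
--     # If the matrix is too small to have an "inner" part (e.g., less than 3x3)
--     # then all elements are considered part of the frame.
--     # In this specific case, for the sums to be equal, the total sum of all elements must be 0,
--     # because the inner sum would be 0.
--     if rows < 3 or cols < 3:
--         total_sum = 0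
--         for r_idx in range(rows):
--             for c_idx in range(cols):
--                 total_sum += mat[r_idx][c_idx]
--         return total_sum == 0
--
--     frame_sum = 0
--     inner_sum = 0
--
--     # Calculate the sum of the frame elements and inner elements
--     for r_idx in range(rows):
--         for c_idx in range(cols):
--             # Check if the current element is on the border (frame)
--             if r_idx == 0 or r_idx == rows - 1 or c_idx == 0 or c_idx == cols - 1:
--                 frame_sum += mat[r_idx][c_idx]
--             else:
--                 inner_sum += mat[r_idx][c_idx]
--
--     return frame_sum == inner_sum
-- ===== SOURCE B (Python) =====
-- def magic_list(mat: list[list[int]]) -> bool: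
--     if not mat:
--         return True
--     rows = len(mat)
--     cols = len(mat[0])
--     total = sum(mat[r][c] for r in range(rows) for c in range(cols))
--     inner = sum(mat[r][c] for r in range(1, rows - 1) for c in range(1, cols - 1))
--     return total == 2 * inner
-- ===== Notes on version B (the rewrite author's own statement) =====
-- stated objective: simpler
-- what changed: Replaces A's two-case frame/inner classification (small-matrix special case plus a per-cell border test accumulating two sums) by two plain sums: the total over all cells and the inner sum over the strictly interior cells, returning total == 2*inner; the small-matrix case collapses automatically since the inner ranges are empty.
import Mathlib
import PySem

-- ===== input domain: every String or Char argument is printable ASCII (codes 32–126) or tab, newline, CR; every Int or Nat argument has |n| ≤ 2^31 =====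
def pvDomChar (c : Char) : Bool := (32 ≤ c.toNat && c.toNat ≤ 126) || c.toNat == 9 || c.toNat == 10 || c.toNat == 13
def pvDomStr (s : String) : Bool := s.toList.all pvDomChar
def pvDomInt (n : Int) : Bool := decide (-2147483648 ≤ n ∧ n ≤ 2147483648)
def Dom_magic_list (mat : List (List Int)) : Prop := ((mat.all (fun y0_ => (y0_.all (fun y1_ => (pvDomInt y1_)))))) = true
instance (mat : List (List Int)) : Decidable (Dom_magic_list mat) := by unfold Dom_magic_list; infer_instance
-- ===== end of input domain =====

-- B is simpler: one total sum and one inner sum, return total == 2*inner (no border test, no small-matrix case). Equivalence is over the return value only.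

-- ===== PORT A =====
def magic_list (mat : List (List Int)) : Bool :=
  if mat = [] then true
  else
    let rows : Int := mat.length
    let cols : Int := (PySem.List.pyGetD mat 0 ([] : List Int)).length
    if rows < 3 ∨ cols < 3 then
      let total :=
        (PySem.List.pyRange 0 rows 1).foldl (fun acc r =>
          (PySem.List.pyRange 0 cols 1).foldl (fun acc2 c =>
            acc2 + PySem.List.pyGetD (PySem.List.pyGetD mat r []) c 0) acc) 0
      total == 0
    else
      let p :=
        (PySem.List.pyRange 0 rows 1).foldl (fun p r =>
          (PySem.List.pyRange 0 cols 1).foldl (fun p c =>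
            if r == 0 || r == rows - 1 || c == 0 || c == cols - 1 then
              (p.1 + PySem.List.pyGetD (PySem.List.pyGetD mat r []) c 0, p.2)
            else
              (p.1, p.2 + PySem.List.pyGetD (PySem.List.pyGetD mat r []) c 0)) p) ((0 : Int), (0 : Int))
      p.1 == p.2

-- ===== PORT B =====
def magic_list_alt (mat : List (List Int)) : Bool :=
  if mat = [] then true
  else
    let rows : Int := mat.length
    let cols : Int := (PySem.List.pyGetD mat 0 ([] : List Int)).length
    let total :=
      (PySem.List.pyRange 0 rows 1).foldl (fun acc r =>
        (PySem.List.pyRange 0 cols 1).foldl (fun a c =>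
          a + PySem.List.pyGetD (PySem.List.pyGetD mat r []) c 0) acc) 0
    let inner :=
      (PySem.List.pyRange 1 (rows - 1) 1).foldl (fun acc r =>
        (PySem.List.pyRange 1 (cols - 1) 1).foldl (fun a c =>
          a + PySem.List.pyGetD (PySem.List.pyGetD mat r []) c 0) acc) 0
    total == 2 * inner

-- ===== PRECONDITION & SPEC =====
-- Pre_ excludes exactly the ragged matrices with a row shorter than the first row, on which the Python A raises IndexError (B raises there too).
def Pre_magic_list (mat : List (List Int)) : Prop :=
  ∀ row ∈ mat, (mat.headD []).length ≤ row.length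
instance (mat : List (List Int)) : Decidable (Pre_magic_list mat) := by unfold Pre_magic_list; infer_instance

def pvWitness_magic_list : List (List Int) := [[1, 2, 3], [4, 5, 6], [7, 8, 9]]

def Spec_magic_list (mat : List (List Int)) (out : Bool) : Prop := out = magic_list_alt mat
instance (mat : List (List Int)) (out : Bool) : Decidable (Spec_magic_list mat out) := by unfold Spec_magic_list; infer_instance

-- ===== CLAIM (what is proved, stated in full; the proofs are below) =====
def Claim_equal_magic_list : Prop := ∀ (mat : List (List Int)), Dom_magic_list mat → Pre_magic_list mat → Spec_magic_list mat (magic_list mat)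

-- ===== LEMMAS AND PROOFS =====

-- sum fold: L.foldl (fun a x => a + f x) init = init + (L.map f).sum
theorem pv_foldl_sum {α : Type} (L : List α) (f : α → Int) (init : Int) :
    L.foldl (fun a x => a + f x) init = init + (L.map f).sum := by
  induction L generalizing init with
  | nil => simp
  | cons x xs ih => simp [List.foldl_cons, ih]; ring

-- pair fold with a boolean split
theorem pv_foldl_pair_split {α : Type} (L : List α) (cond : α → Bool) (f : α → Int) (p : Int × Int) :
    L.foldl (fun p x => if cond x then (p.1 + f x, p.2) else (p.1, p.2 + f x)) p
      = (p.1 + (L.map (fun x => if cond x then f x else 0)).sum,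
         p.2 + (L.map (fun x => if cond x then 0 else f x)).sum) := by
  induction L generalizing p with
  | nil => simp
  | cons x xs ih =>
      simp only [List.foldl_cons, List.map_cons, List.sum_cons, ih]
      by_cases h : cond x = true <;> simp [h] <;> ring

-- pair fold adding componentwise
theorem pv_foldl_pair_add {α : Type} (L : List α) (a b : α → Int) (p : Int × Int) :
    L.foldl (fun p x => (p.1 + a x, p.2 + b x)) p
      = (p.1 + (L.map a).sum, p.2 + (L.map b).sum) := by
  induction L generalizing p with
  | nil => simp
  | cons x xs ih =>
      simp only [List.foldl_cons, List.map_cons, List.sum_cons, ih]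
      rw [Prod.mk.injEq]
      constructor <;> ring

theorem pv_sum_split {α : Type} (L : List α) (cond : α → Bool) (f : α → Int) :
    (L.map (fun x => if cond x then f x else 0)).sum
      + (L.map (fun x => if cond x then 0 else f x)).sum = (L.map f).sum := by
  induction L with
  | nil => simp
  | cons x xs ih =>
      simp only [List.map_cons, List.sum_cons]
      by_cases h : cond x = true <;> simp [h] <;> linarith

-- the interior sum of the ite-form equals the plain sum over the inner ranges
theorem pv_inner_eq (g : Int → Int → Int) (rows cols : Int) (hr : 3 ≤ rows) (hc : 3 ≤ cols) :
    ((PySem.List.pyRange 0 rows 1).map (fun r =>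
        ((PySem.List.pyRange 0 cols 1).map (fun c =>
          if r == 0 || r == rows - 1 || c == 0 || c == cols - 1 then 0 else g r c)).sum)).sum
      = ((PySem.List.pyRange 1 (rows - 1) 1).map (fun r =>
          ((PySem.List.pyRange 1 (cols - 1) 1).map (fun c => g r c)).sum)).sum := by
  have hrowsplit : PySem.List.pyRange 0 rows 1
      = 0 :: (PySem.List.pyRange 1 (rows - 1) 1 ++ [rows - 1]) := by
    rw [PySem.List.pyRange_one_cons (by omega)]
    norm_num
    rw [PySem.List.pyRange_one_append 1 (rows - 1) rows (by omega) (by omega),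
        PySem.List.pyRange_one_cons (show rows - 1 < rows by omega),
        PySem.List.pyRange_one_eq_nil (show rows ≤ rows - 1 + 1 by omega)]
  have hcolsplit : PySem.List.pyRange 0 cols 1
      = 0 :: (PySem.List.pyRange 1 (cols - 1) 1 ++ [cols - 1]) := by
    rw [PySem.List.pyRange_one_cons (by omega)]
    norm_num
    rw [PySem.List.pyRange_one_append 1 (cols - 1) cols (by omega) (by omega),
        PySem.List.pyRange_one_cons (show cols - 1 < cols by omega),
        PySem.List.pyRange_one_eq_nil (show cols ≤ cols - 1 + 1 by omega)]
  rw [hrowsplit]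
  simp only [List.map_cons, List.map_append, List.sum_cons, List.sum_append,
    List.map_cons, List.map_nil, List.sum_nil]
  have hz : ∀ r : Int, r = 0 ∨ r = rows - 1 →
      ((PySem.List.pyRange 0 cols 1).map (fun c =>
        if r == 0 || r == rows - 1 || c == 0 || c == cols - 1 then 0 else g r c)).sum = 0 := by
    intro r hr0
    have : ∀ c ∈ PySem.List.pyRange 0 cols 1,
        (if r == 0 || r == rows - 1 || c == 0 || c == cols - 1 then 0 else g r c) = 0 := by
      intro c _
      rcases hr0 with h | h <;> simp [h]
    rw [List.map_congr_left this]; simp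
  rw [hz 0 (Or.inl rfl), hz (rows - 1) (Or.inr rfl)]
  have hmid : ∀ r ∈ PySem.List.pyRange 1 (rows - 1) 1,
      ((PySem.List.pyRange 0 cols 1).map (fun c =>
        if r == 0 || r == rows - 1 || c == 0 || c == cols - 1 then 0 else g r c)).sum
      = ((PySem.List.pyRange 1 (cols - 1) 1).map (fun c => g r c)).sum := by
    intro r hrmem
    rw [PySem.List.mem_pyRange_one] at hrmem
    have hmap : List.map (fun c =>
        if r == 0 || r == rows - 1 || c == 0 || c == cols - 1 then 0 else g r c)
        (PySem.List.pyRange 1 (cols - 1) 1) = List.map (fun c => g r c) (PySem.List.pyRange 1 (cols - 1) 1) := by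
      apply List.map_congr_left
      intro c hcmem
      rw [PySem.List.mem_pyRange_one] at hcmem
      have hr0 : (r == (0 : Int)) = false := by simp; omega
      have hr1 : (r == rows - 1) = false := by simp; omega
      have hc0 : (c == (0 : Int)) = false := by simp; omega
      have hc1 : (c == cols - 1) = false := by simp; omega
      simp [hr0, hr1, hc0, hc1]
    rw [hcolsplit, List.map_cons, List.map_append, List.map_cons, List.map_nil, hmap]
    simp
  rw [List.map_congr_left hmid]
  simp

-- inner sum vanishes in the small case
theorem pv_inner_small (g : Int → Int → Int) (rows cols : Int) (h : rows < 3 ∨ cols < 3)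
    (hr : 1 ≤ rows) (hc0 : 0 ≤ cols) :
    ((PySem.List.pyRange 1 (rows - 1) 1).map (fun r =>
      ((PySem.List.pyRange 1 (cols - 1) 1).map (fun c => g r c)).sum)).sum = 0 := by
  rcases h with h | h
  · rw [PySem.List.pyRange_one_eq_nil (show rows - 1 ≤ 1 by omega)]; simp
  · rw [PySem.List.pyRange_one_eq_nil (show cols - 1 ≤ 1 by omega)]
    simp

-- ===== VERDICT (by name: the statement is the Claim_ definition above) =====
theorem magic_list_spec : Claim_equal_magic_list := by
  intro mat _ _
  unfold Spec_magic_list magic_list magic_list_alt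
  by_cases hmat : mat = []
  · simp [hmat]
  · simp only [hmat, if_false]
    set rows : Int := (mat.length : Int) with hrows
    set cols : Int := ((PySem.List.pyGetD mat 0 ([] : List Int)).length : Int) with hcols
    set g : Int → Int → Int := fun r c => PySem.List.pyGetD (PySem.List.pyGetD mat r []) c 0 with hg
    have hr1 : 1 ≤ rows := by
      have : mat.length ≠ 0 := by simpa [List.length_eq_zero_iff] using hmat
      omega
    have hc0 : 0 ≤ cols := by positivity
    -- rewrite all folds to sums
    simp only [pv_foldl_pair_split, pv_foldl_pair_add, pv_foldl_sum, zero_add]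
    by_cases hsmall : rows < 3 ∨ cols < 3
    · simp only [hsmall, if_true]
      rw [pv_inner_small g rows cols hsmall hr1 hc0]
      simp
    · simp only [hsmall, if_false]
      rw [not_or, not_lt, not_lt] at hsmall
      obtain ⟨hr3, hc3⟩ := hsmall
      -- frame + inner = total, inner = inner-range sum
      have htot : ∀ r : Int,
          ((PySem.List.pyRange 0 cols 1).map (fun c =>
            if r == 0 || r == rows - 1 || c == 0 || c == cols - 1 then g r c else 0)).sum
          + ((PySem.List.pyRange 0 cols 1).map (fun c =>
            if r == 0 || r == rows - 1 || c == 0 || c == cols - 1 then 0 else g r c)).sum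
          = ((PySem.List.pyRange 0 cols 1).map (fun c => g r c)).sum := by
        intro r
        exact pv_sum_split _ (fun c => r == 0 || r == rows - 1 || c == 0 || c == cols - 1) (g r)
      have hinner := pv_inner_eq g rows cols hr3 hc3
      -- name the three sums
      set F := ((PySem.List.pyRange 0 rows 1).map (fun r =>
          ((PySem.List.pyRange 0 cols 1).map (fun c =>
            if r == 0 || r == rows - 1 || c == 0 || c == cols - 1 then g r c else 0)).sum)).sum with hF
      set I := ((PySem.List.pyRange 0 rows 1).map (fun r =>
          ((PySem.List.pyRange 0 cols 1).map (fun c =>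
            if r == 0 || r == rows - 1 || c == 0 || c == cols - 1 then 0 else g r c)).sum)).sum with hI
      set T := ((PySem.List.pyRange 0 rows 1).map (fun r =>
          ((PySem.List.pyRange 0 cols 1).map (fun c => g r c)).sum)).sum with hT
      have hFIT : F + I = T := by
        rw [hF, hI, hT]
        induction PySem.List.pyRange 0 rows 1 with
        | nil => simp
        | cons r rs ih =>
            simp only [List.map_cons, List.sum_cons]
            have := htot r
            linarith
      -- fold the alt's inner-range sum into I, then decide by arithmetic
      rw [← hinner]
      by_cases h : F = I
      · simp [h, show T = 2 * I by omega]
      · simp [h, show ¬ T = 2 * I by omega]
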